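-- pv_equiv track=rewrite | github.com/ElevenZwei/etf_res | datavis/dsp_scripts/s12_compare_rollup.py | sort_cols
-- ===== SOURCE A (Python) =====
-- import bisect
--
-- def prefix_match(sorted_list, prefix):
--     # return [item for item in sorted_list if item.startswith(prefix)]
--     idx = bisect.bisect_left(sorted_list, prefix)
--     matched = []
--     while idx < len(sorted_list) and sorted_list[idx].startswith(prefix):
--         matched.append(sorted_list[idx])
--         idx += 1
--     return matched
--
-- def sort_cols(cols: list[str]):
--     # 这里我们按照一定的顺序来排序列
--     cols.sort()
--     order = ['pnl', 'pnl_acc', 'cnt', 'cnt_acc', 'pnl_p', 'pnl_p_acc', 'hold_time', 'hold_time_acc']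
--     order = [x + '@' for x in order]
--     sorted_cols = []
--     for prefix in order:
--         matched = prefix_match(cols, prefix)
--         sorted_cols.extend(matched)
--     for col in cols:
--         if col not in sorted_cols:
--             sorted_cols.append(col)
--     return sorted_cols
-- ===== SOURCE B (Python) =====
-- def sort_cols(cols: list[str]):
--     # Same in-place sort side effect as the original; one bucket-partition pass
--     # instead of a bisect scan per prefix.
--     cols.sort()
--     order = ['pnl', 'pnl_acc', 'cnt', 'cnt_acc', 'pnl_p', 'pnl_p_acc', 'hold_time', 'hold_time_acc']
--     order = [x + '@' for x in order]
--     buckets = [[] for _ in order]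
--     rest = []
--     seen = set()
--     for col in cols:
--         i = next((i for i, p in enumerate(order) if col.startswith(p)), None)
--         if i is not None:
--             buckets[i].append(col)
--         elif col not in seen:
--             seen.add(col)
--             rest.append(col)
--     out = []
--     for b in buckets:
--         out.extend(b)
--     out.extend(rest)
--     return out
-- ===== Notes on version B (the rewrite author's own statement) =====
-- stated objective: faster
-- what changed: Replaces the per-prefix bisect-and-scan passes over the sorted list by a single bucket-partition pass that assigns each column to the bucket of its first matching prefix (or to a seen-set-deduplicated remainder), then concatenates buckets in prefix order, removing the final membership-test loop over the growing output list.
import Mathlib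
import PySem

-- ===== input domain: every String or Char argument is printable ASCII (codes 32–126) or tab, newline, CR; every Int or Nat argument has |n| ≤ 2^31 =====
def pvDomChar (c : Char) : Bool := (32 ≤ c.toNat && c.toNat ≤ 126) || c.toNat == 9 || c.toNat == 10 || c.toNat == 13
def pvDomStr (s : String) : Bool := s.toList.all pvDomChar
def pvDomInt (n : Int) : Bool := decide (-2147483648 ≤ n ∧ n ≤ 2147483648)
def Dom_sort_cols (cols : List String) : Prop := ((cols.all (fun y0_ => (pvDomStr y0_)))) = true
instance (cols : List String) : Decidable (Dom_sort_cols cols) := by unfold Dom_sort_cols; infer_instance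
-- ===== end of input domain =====

-- B replaces A's per-prefix bisect-and-scan passes and its quadratic membership loop by a single
-- bucket-partition pass with a seen-set (objective: faster); in Python both A and B sort the
-- argument list in place — the equivalence proved here is about the return value.

-- ===== PORT A =====
-- the list of prefix bases both Pythons hard-code
def pvOrderBase : List String :=
  ["pnl", "pnl_acc", "cnt", "cnt_acc", "pnl_p", "pnl_p_acc", "hold_time", "hold_time_acc"]

-- the while loop of prefix_match: scan forward from idx, collecting while startswith holds
def prefixMatchGo (s : List String) (p : String) (idx : Nat) (matched : List String) : List String :=
  if h : idx < s.length then
    if PySem.Str.startswith s[idx] p then prefixMatchGo s p (idx + 1) (matched ++ [s[idx]])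
    else matched
  else matched
termination_by s.length - idx

def prefix_match (sorted_list : List String) (p : String) : List String :=
  prefixMatchGo sorted_list p (PySem.List.bisectLeft sorted_list p) []

def sort_cols (cols : List String) : List String :=
  let cols := PySem.List.sorted cols (fun x => x)
  let order := pvOrderBase.map (fun x => x ++ "@")
  let sortedCols := order.foldl (fun acc pre => acc ++ prefix_match cols pre) []
  cols.foldl (fun acc col => if col ∈ acc then acc else acc ++ [col]) sortedCols

-- ===== PORT B =====
-- one step of B's single partition pass; state = (buckets, rest, seen)
def altStep (order : List String) (st : List (List String) × List String × PySem.Set String)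
    (col : String) : List (List String) × List String × PySem.Set String :=
  match order.findIdx? (fun p => PySem.Str.startswith col p) with
  | some i => (st.1.set i (st.1.getD i [] ++ [col]), st.2.1, st.2.2)
  | none => if col ∈ st.2.2 then st else (st.1, st.2.1 ++ [col], PySem.Set.add st.2.2 col)

def sort_cols_alt (cols : List String) : List String :=
  let cols := PySem.List.sorted cols (fun x => x)
  let order := pvOrderBase.map (fun x => x ++ "@")
  let st := cols.foldl (altStep order) (List.replicate order.length [], [], PySem.Set.empty)
  (st.1.foldl (fun out b => out ++ b) []) ++ st.2.1

-- ===== PRECONDITION & SPEC =====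
def Spec_sort_cols (cols : List String) (out : List String) : Prop := out = sort_cols_alt cols
instance (cols : List String) (out : List String) : Decidable (Spec_sort_cols cols out) := by unfold Spec_sort_cols; infer_instance

-- ===== CLAIM (what is proved, stated in full; the proofs are below) =====
def Claim_equal_sort_cols : Prop := ∀ (cols : List String), Dom_sort_cols cols → Spec_sort_cols cols (sort_cols cols)

-- ===== LEMMAS AND PROOFS =====

-- proof-side abbreviations
def pvOrd : List String := pvOrderBase.map (fun x => x ++ "@")

def pvSw (c p : String) : Bool := PySem.Str.startswith c p

-- index of the first prefix in pvOrd that c starts with (none if no prefix matches)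
def pvFirst (c : String) : Option Nat := pvOrd.findIdx? (fun p => pvSw c p)

-- canonical "remaining columns": unmatched columns, deduplicated against r and one another
def pvRest : List String → List String → List String
  | [], _ => []
  | c :: u, r =>
    if pvFirst c = none then
      (if c ∈ r then pvRest u r else c :: pvRest u (r ++ [c]))
    else pvRest u r

-- startswith is prefix of the char lists
theorem pvSw_iff (c p : String) : pvSw c p = true ↔ p.toList <+: c.toList := by
  simp [pvSw, PySem.Str.startswith_eq, PySem.Chars.startswith_iff]

-- a prefix is ≤ in the lexicographic list order
theorem pvPrefix_le (p c : List Char) (h : p <+: c) : p ≤ c := by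
  induction p generalizing c with
  | nil =>
    cases c with
    | nil => exact le_refl _
    | cons b c' => exact le_of_lt (List.Lex.nil)
  | cons a p' ih =>
    rcases h with ⟨t, ht⟩
    cases c with
    | nil => simp at ht
    | cons b c' =>
      obtain ⟨rfl, h2⟩ := by simpa using ht
      rcases lt_or_eq_of_le (ih c' ⟨t, h2⟩) with hlt | rfl
      · exact le_of_lt (List.Lex.cons hlt)
      · exact le_refl _

-- a string is ≥ any string it starts with
theorem pvSw_le {c p : String} (h : pvSw c p = true) : p ≤ c := by
  rw [String.le_iff_toList_le]
  exact pvPrefix_le _ _ ((pvSw_iff c p).mp h)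

-- prefix sandwich: p ≤ m ≤ c and p a prefix of c imply p a prefix of m
theorem pvPrefix_sandwich : ∀ (p m c : List Char), p ≤ m → m ≤ c → p <+: c → p <+: m := by
  intro p
  induction p with
  | nil => intro m c _ _ _; exact List.nil_prefix
  | cons a p' ih =>
    intro m c hpm hmc hpc
    obtain ⟨c', rfl, hp'c⟩ : ∃ c', c = a :: c' ∧ p' <+: c' := by
      rcases hpc with ⟨t, ht⟩
      cases c with
      | nil => simp at ht
      | cons b c' =>
        obtain ⟨rfl, h2⟩ := by simpa using ht
        exact ⟨c', rfl, ⟨t, h2⟩⟩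
    rcases lt_or_eq_of_le hpm with hlt | rfl
    · cases (hlt : List.Lex (· < ·) (a :: p') m) with
      | @rel _ _ b m' hab =>
        exfalso
        rcases lt_or_eq_of_le hmc with h2 | h2
        · cases (h2 : List.Lex (· < ·) (b :: m') (a :: c')) with
          | rel h3 => exact absurd (lt_trans hab h3) (lt_irrefl a)
          | cons h3 => exact absurd hab (lt_irrefl a)
        · cases h2; exact absurd hab (lt_irrefl a)
      | @cons _ _ m' hlex =>
        have hm'c' : m' ≤ c' := by
          rcases lt_or_eq_of_le hmc with h2 | h2
          · cases (h2 : List.Lex (· < ·) (a :: m') (a :: c')) with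
            | rel h3 => exact absurd h3 (lt_irrefl a)
            | cons h3 => exact le_of_lt h3
          · cases h2; exact le_refl _
        exact List.cons_prefix_cons.mpr ⟨rfl, ih m' c' (le_of_lt hlex) hm'c' hp'c⟩
    · exact List.prefix_rfl

-- sandwich for startswith on strings
theorem pvSw_between {p m c : String} (hpm : p ≤ m) (hmc : m ≤ c) (h : pvSw c p = true) :
    pvSw m p = true := by
  rw [pvSw_iff] at h ⊢
  exact pvPrefix_sandwich p.toList m.toList c.toList
    (String.le_iff_toList_le.mp hpm) (String.le_iff_toList_le.mp hmc) h

-- the bisect_left loop on a sorted list: everything before the result is < x, everything after is ≥ x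
theorem pvBisectLoop_spec {α : Type} [LinearOrder α] (xs : List α) (x : α)
    (hs : List.Pairwise (· ≤ ·) xs) :
    ∀ (fuel lo hi : Nat), lo ≤ hi → hi ≤ xs.length → hi - lo ≤ fuel →
      (∀ (j : Nat) (hj : j < xs.length), j < lo → xs[j] < x) →
      (∀ (j : Nat) (hj : j < xs.length), hi ≤ j → x ≤ xs[j]) →
      PySem.List.bisectLeftLoop xs x fuel lo hi ≤ xs.length ∧
      (∀ (j : Nat) (hj : j < xs.length), j < PySem.List.bisectLeftLoop xs x fuel lo hi → xs[j] < x) ∧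
      (∀ (j : Nat) (hj : j < xs.length), PySem.List.bisectLeftLoop xs x fuel lo hi ≤ j → x ≤ xs[j]) := by
  have hmono := List.pairwise_iff_getElem.mp hs
  intro fuel
  induction fuel with
  | zero =>
    intro lo hi hlh hhl hfu inv1 inv2
    have : lo = hi := by omega
    subst this
    simp only [PySem.List.bisectLeftLoop]
    exact ⟨by omega, inv1, inv2⟩
  | succ fuel ih =>
    intro lo hi hlh hhl hfu inv1 inv2
    rw [PySem.List.bisectLeftLoop]
    by_cases hcmp : lo < hi
    · have hmid : (lo + hi) / 2 < xs.length := by omega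
      simp only [if_pos hcmp, List.getElem?_eq_getElem hmid]
      by_cases hy : xs[(lo + hi) / 2] < x
      · rw [if_pos hy]
        exact ih ((lo + hi) / 2 + 1) hi (by omega) hhl (by omega)
          (fun j hj hlt => by
            rcases Nat.lt_or_ge j ((lo + hi) / 2) with h | h
            · exact lt_of_le_of_lt (hmono j ((lo + hi) / 2) hj hmid h) hy
            · have : j = (lo + hi) / 2 := by omega
              subst this; exact hy)
          inv2
      · rw [if_neg hy]
        have hxy : x ≤ xs[(lo + hi) / 2] := le_of_not_gt hy
        exact ih lo ((lo + hi) / 2) (by omega) (by omega) (by omega) inv1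
          (fun j hj hle => by
            rcases Nat.lt_or_ge ((lo + hi) / 2) j with h | h
            · exact le_trans hxy (hmono ((lo + hi) / 2) j hmid hj h)
            · have : j = (lo + hi) / 2 := by omega
              subst this; exact hxy)
    · have : lo = hi := by omega
      subst this
      rw [if_neg hcmp]
      exact ⟨by omega, inv1, inv2⟩

-- bisect_left spec for strings
theorem pvBisect_spec (xs : List String) (x : String) (hs : List.Pairwise (· ≤ ·) xs) :
    PySem.List.bisectLeft xs x ≤ xs.length ∧
    (∀ (j : Nat) (hj : j < xs.length), j < PySem.List.bisectLeft xs x → xs[j] < x) ∧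
    (∀ (j : Nat) (hj : j < xs.length), PySem.List.bisectLeft xs x ≤ j → x ≤ xs[j]) := by
  have := pvBisectLoop_spec xs x hs xs.length 0 xs.length (by omega) (le_refl _) (by omega)
    (fun j hj h => by omega) (fun j hj h => by omega)
  simpa [PySem.List.bisectLeft] using this

-- the scan loop collects the startswith-run beginning at idx
theorem prefixMatchGo_eq (s : List String) (p : String) :
    ∀ (idx : Nat) (acc : List String),
      prefixMatchGo s p idx acc = acc ++ (s.drop idx).takeWhile (fun c => pvSw c p) := by
  intro idx acc
  fun_induction prefixMatchGo s p idx acc with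
  | case1 idx acc h hsw ih =>
    rw [ih, List.drop_eq_getElem_cons h, List.takeWhile_cons, if_pos (by simpa [pvSw] using hsw)]
    simp
  | case2 idx acc h hsw =>
    rw [List.drop_eq_getElem_cons h, List.takeWhile_cons, if_neg (by simpa [pvSw] using hsw)]
    simp
  | case3 idx acc h =>
    rw [List.drop_eq_nil_of_le (by omega)]
    simp

-- on a sorted list bounded below by p, the matches form a prefix of the list
theorem pvFilter_eq_takeWhile (p : String) :
    ∀ (t : List String), t.Pairwise (· ≤ ·) → (∀ x ∈ t, p ≤ x) →
      t.filter (fun c => pvSw c p) = t.takeWhile (fun c => pvSw c p) := by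
  intro t
  induction t with
  | nil => intro _ _; rfl
  | cons y t' ih =>
    intro hpw hbd
    obtain ⟨hy, hpw'⟩ := List.pairwise_cons.mp hpw
    by_cases hsw : pvSw y p = true
    · simp only [List.filter_cons, List.takeWhile_cons, hsw, if_true]
      rw [ih hpw' (fun x hx => hbd x (List.mem_cons_of_mem y hx))]
    · have hsw' : pvSw y p = false := by simpa using hsw
      simp only [List.filter_cons, List.takeWhile_cons, hsw', if_false, Bool.false_eq_true]
      rw [List.filter_eq_nil_iff.mpr]
      intro z hz hswz
      exact hsw (pvSw_between (hbd y (List.mem_cons_self)) (hy z hz) hswz)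

-- prefix_match on a sorted list is filter
theorem pvPrefix_match_eq (s : List String) (p : String) (hs : List.Pairwise (· ≤ ·) s) :
    prefix_match s p = s.filter (fun c => pvSw c p) := by
  obtain ⟨hle, h1, h2⟩ := pvBisect_spec s p hs
  rw [prefix_match, prefixMatchGo_eq, List.nil_append]
  conv_rhs => rw [← List.take_append_drop (PySem.List.bisectLeft s p) s]
  rw [List.filter_append]
  have htake : (s.take (PySem.List.bisectLeft s p)).filter (fun c => pvSw c p) = [] := by
    rw [List.filter_eq_nil_iff]
    intro c hc hswc
    obtain ⟨i, hi, rfl⟩ := List.getElem_of_mem hc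
    have hi2 : i < PySem.List.bisectLeft s p ∧ i < s.length := by
      constructor <;> [skip; skip] <;> (have := hi; simp [List.length_take] at this; omega)
    rw [List.getElem_take] at hswc
    exact absurd (pvSw_le hswc) (not_le_of_gt (h1 i hi2.2 hi2.1))
  have hdrop : (s.drop (PySem.List.bisectLeft s p)).filter (fun c => pvSw c p) =
      (s.drop (PySem.List.bisectLeft s p)).takeWhile (fun c => pvSw c p) := by
    apply pvFilter_eq_takeWhile
    · exact hs.sublist (List.drop_sublist _ _)
    · intro y hy
      obtain ⟨j, hj, rfl⟩ := List.getElem_of_mem hy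
      rw [List.getElem_drop]
      exact le_trans (h2 (PySem.List.bisectLeft s p + j) (by simp [List.length_drop] at hj; omega) (by omega)) (le_refl _)
  rw [htake, hdrop, List.nil_append]

-- the eight prefixes are pairwise incomparable, so each column matches at most one
theorem pvOrd_uniq (c : String) (i j : Nat) (hi : i < pvOrd.length) (hj : j < pvOrd.length)
    (h1 : pvSw c pvOrd[i] = true) (h2 : pvSw c pvOrd[j] = true) : i = j := by
  have hpw : List.Pairwise
      (fun p q : String => ¬(p.toList <+: q.toList) ∧ ¬(q.toList <+: p.toList)) pvOrd := by
    decide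
  rw [List.pairwise_iff_getElem] at hpw
  rw [pvSw_iff] at h1 h2
  rcases lt_trichotomy i j with h | h | h
  · rcases List.prefix_or_prefix_of_prefix h1 h2 with hp | hp
    · exact absurd hp (hpw i j hi hj h).1
    · exact absurd hp (hpw i j hi hj h).2
  · exact h
  · rcases List.prefix_or_prefix_of_prefix h1 h2 with hp | hp
    · exact absurd hp (hpw j i hj hi h).2
    · exact absurd hp (hpw j i hj hi h).1

theorem pvFirst_eq_some_iff (c : String) (i : Nat) (hi : i < pvOrd.length) :
    pvFirst c = some i ↔ pvSw c pvOrd[i] = true := by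
  constructor
  · intro h
    obtain ⟨_, hp, _⟩ := List.findIdx?_eq_some_iff_getElem.mp h
    exact hp
  · intro h
    have hne : pvFirst c ≠ none := by
      intro hn
      have := List.findIdx?_eq_none_iff.mp hn pvOrd[i] (List.getElem_mem hi)
      rw [h] at this; simp at this
    obtain ⟨j, hj⟩ := Option.ne_none_iff_exists'.mp hne
    obtain ⟨hjl, hpj, _⟩ := List.findIdx?_eq_some_iff_getElem.mp hj
    rw [hj, pvOrd_uniq c j i hjl hi hpj h]

theorem pvFirst_ne_none_iff (c : String) :
    pvFirst c ≠ none ↔ ∃ q ∈ pvOrd, pvSw c q = true := by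
  rw [Ne, pvFirst, List.findIdx?_eq_none_iff]
  push Not
  constructor
  · rintro ⟨q, hq, h⟩; exact ⟨q, hq, by simpa using h⟩
  · rintro ⟨q, hq, h⟩; exact ⟨q, hq, by simpa using h⟩

-- characterization of B's partition pass
theorem pvAltLoop (u : List String) :
    ∀ (bk : List (List String)) (r : List String) (sn : PySem.Set String),
      bk.length = pvOrd.length → (∀ c : String, c ∈ sn ↔ c ∈ r) →
      (u.foldl (altStep pvOrd) (bk, r, sn)).1.length = bk.length ∧
      (∀ i, i < bk.length →
        (u.foldl (altStep pvOrd) (bk, r, sn)).1.getD i [] =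
          bk.getD i [] ++ u.filter (fun c => decide (pvFirst c = some i))) ∧
      (u.foldl (altStep pvOrd) (bk, r, sn)).2.1 = r ++ pvRest u r := by
  induction u with
  | nil =>
    intro bk r sn _ _
    refine ⟨rfl, fun i _ => by simp, by simp [pvRest]⟩
  | cons c u ih =>
    intro bk r sn hlen hsn
    rw [List.foldl_cons]
    have hstep : altStep pvOrd (bk, r, sn) c =
        match pvFirst c with
        | some i => (bk.set i (bk.getD i [] ++ [c]), r, sn)
        | none => if c ∈ sn then (bk, r, sn) else (bk, r ++ [c], PySem.Set.add sn c) := by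
      rfl
    cases hfm : pvFirst c with
    | some i0 =>
      have hi0 : i0 < pvOrd.length := (List.findIdx?_eq_some_iff_getElem.mp hfm).fst
      have hi0' : i0 < bk.length := by omega
      rw [hstep, hfm]
      obtain ⟨ihl, ihg, ihr⟩ := ih (bk.set i0 (bk.getD i0 [] ++ [c])) r sn (by simp [hlen]) hsn
      refine ⟨by simpa using ihl, ?_, ?_⟩
      · intro i hib
        rw [ihg i (by simpa using hib)]
        by_cases hii : i = i0
        · subst hii
          rw [List.filter_cons_of_pos (by simp [hfm])]
          rw [show (bk.set i (bk.getD i [] ++ [c])).getD i [] = bk.getD i [] ++ [c] by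
            simp [List.getD_eq_getElem?_getD, hi0']]
          simp
        · rw [List.filter_cons_of_neg (by simp [hfm, Ne.symm hii])]
          rw [show (bk.set i0 (bk.getD i0 [] ++ [c])).getD i [] = bk.getD i [] by
            simp [List.getD_eq_getElem?_getD, List.getElem?_set_ne (Ne.symm hii)]]
      · rw [ihr]
        have : pvRest (c :: u) r = pvRest u r := by
          rw [pvRest, if_neg (by simp [hfm])]
        rw [this]
    | none =>
      rw [hstep, hfm]
      by_cases hc : c ∈ sn
      · rw [if_pos hc]
        obtain ⟨ihl, ihg, ihr⟩ := ih bk r sn hlen hsn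
        refine ⟨ihl, ?_, ?_⟩
        · intro i hib
          rw [ihg i hib, List.filter_cons_of_neg (by simp [hfm])]
        · rw [ihr, pvRest, if_pos hfm, if_pos ((hsn c).mp hc)]
      · rw [if_neg hc]
        have hsn' : ∀ c' : String, c' ∈ PySem.Set.add sn c ↔ c' ∈ r ++ [c] := by
          intro c'
          rw [PySem.Set.mem_add]
          simp [hsn c']
        obtain ⟨ihl, ihg, ihr⟩ := ih bk (r ++ [c]) (PySem.Set.add sn c) hlen hsn'
        refine ⟨ihl, ?_, ?_⟩
        · intro i hib
          rw [ihg i hib, List.filter_cons_of_neg (by simp [hfm])]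
        · rw [ihr, pvRest, if_pos hfm, if_neg (fun h => hc ((hsn c).mpr h))]
          simp

-- characterization of A's second loop
theorem pvALoop (u : List String) :
    ∀ (M r : List String), (∀ c ∈ u, (c ∈ M ↔ pvFirst c ≠ none ∨ c ∈ r)) →
      u.foldl (fun acc col => if col ∈ acc then acc else acc ++ [col]) M = M ++ pvRest u r := by
  induction u with
  | nil => intro M r _; simp [pvRest]
  | cons c u ih =>
    intro M r hyp
    rw [List.foldl_cons]
    by_cases hc : c ∈ M
    · rw [if_pos hc]
      have hor := (hyp c (List.mem_cons_self)).mp hc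
      have hrest : pvRest (c :: u) r = pvRest u r := by
        cases hfm : pvFirst c with
        | some i => rw [pvRest, if_neg (by simp [hfm])]
        | none =>
          have hcr : c ∈ r := by
            rcases hor with h | h
            · exact absurd hfm h
            · exact h
          rw [pvRest, if_pos hfm, if_pos hcr]
      rw [hrest]
      exact ih M r (fun c' hc' => hyp c' (List.mem_cons_of_mem c hc'))
    · rw [if_neg hc]
      have hmk := fun h => hc ((hyp c (List.mem_cons_self)).mpr h)
      have hnone : pvFirst c = none := by
        by_contra hne; exact hmk (Or.inl hne)
      have hnr : c ∉ r := fun hr => hmk (Or.inr hr)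
      have hyp' : ∀ c' ∈ u, (c' ∈ M ++ [c] ↔ pvFirst c' ≠ none ∨ c' ∈ r ++ [c]) := by
        intro c' hc'
        simp only [List.mem_append, List.mem_singleton]
        constructor
        · rintro (h | rfl)
          · rcases (hyp c' (List.mem_cons_of_mem c hc')).mp h with h2 | h2
            · exact Or.inl h2
            · exact Or.inr (Or.inl h2)
          · exact Or.inr (Or.inr rfl)
        · rintro (h | h | rfl)
          · exact Or.inl ((hyp c' (List.mem_cons_of_mem c hc')).mpr (Or.inl h))
          · exact Or.inl ((hyp c' (List.mem_cons_of_mem c hc')).mpr (Or.inr h))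
          · exact Or.inr rfl
      rw [ih (M ++ [c]) (r ++ [c]) hyp', pvRest, if_pos hnone, if_neg hnr]
      simp

-- the bucket filters coincide with the per-prefix filters
theorem pvFilter_first (i : Nat) (hi : i < pvOrd.length) :
    (fun c => decide (pvFirst c = some i)) = (fun c => pvSw c pvOrd[i]) := by
  funext c
  by_cases h : pvSw c pvOrd[i] = true
  · simp [h, (pvFirst_eq_some_iff c i hi).mpr h]
  · have : ¬ pvFirst c = some i := fun hf => h ((pvFirst_eq_some_iff c i hi).mp hf)
    simp [this, Bool.eq_false_iff.mpr h]

-- the two ports agree on every input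
theorem pvMain (cols : List String) : sort_cols cols = sort_cols_alt cols := by
  have hs : List.Pairwise (· ≤ ·) (PySem.List.sorted cols (fun x => x)) := by
    simpa using PySem.List.sorted_pairwise cols (fun x => x)
  set s := PySem.List.sorted cols (fun x => x) with hsdef
  have hA : sort_cols cols =
      s.foldl (fun acc col => if col ∈ acc then acc else acc ++ [col])
        (pvOrd.foldl (fun acc pre => acc ++ prefix_match s pre) []) := rfl
  have hB : sort_cols_alt cols =
      ((s.foldl (altStep pvOrd) (List.replicate pvOrd.length [], [], PySem.Set.empty)).1.foldl
        (fun out b => out ++ b) []) ++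
      (s.foldl (altStep pvOrd) (List.replicate pvOrd.length [], [], PySem.Set.empty)).2.1 := rfl
  have hM : pvOrd.foldl (fun acc pre => acc ++ prefix_match s pre) [] =
      pvOrd.flatMap (fun q => s.filter (fun c => pvSw c q)) := by
    rw [PySem.List.foldl_append_eq_flatMap, List.nil_append]
    exact List.flatMap_congr (fun q _ => pvPrefix_match_eq s q hs)
  have hMmem : ∀ c ∈ s,
      (c ∈ pvOrd.foldl (fun acc pre => acc ++ prefix_match s pre) [] ↔
        pvFirst c ≠ none ∨ c ∈ ([] : List String)) := by
    intro c hcs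
    rw [hM]
    simp only [List.mem_flatMap, List.mem_filter, pvFirst_ne_none_iff, List.not_mem_nil, or_false]
    constructor
    · rintro ⟨q, hq, _, hsw⟩; exact ⟨q, hq, hsw⟩
    · rintro ⟨q, hq, hsw⟩; exact ⟨q, hq, hcs, hsw⟩
  obtain ⟨hl, hg, hr⟩ := pvAltLoop s (List.replicate pvOrd.length []) [] PySem.Set.empty
    (by simp) (by simp [PySem.Set.empty])
  have hres : (s.foldl (altStep pvOrd) (List.replicate pvOrd.length [], [], PySem.Set.empty)).1 =
      pvOrd.map (fun q => s.filter (fun c => pvSw c q)) := by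
    apply List.ext_getElem
    · rw [hl, List.length_replicate, List.length_map]
    · intro i h1 h2
      have hi : i < pvOrd.length := by simpa using h2
      rw [List.getElem_map, ← List.getD_eq_getElem _ ([] : List String) h1,
        hg i (by simpa using hi), ← pvFilter_first i hi]
      simp
  rw [hA, hB, pvALoop s _ [] hMmem, hres, hr, hM]
  rw [PySem.List.foldl_append_eq_flatMap (fun b => b), List.nil_append, List.nil_append]
  rw [List.flatMap_def]
  simp

-- ===== VERDICT (by name: the statement is the Claim_ definition above) =====
theorem sort_cols_spec : Claim_equal_sort_cols := by
  intro cols _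
  unfold Spec_sort_cols
  exact pvMain cols
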